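-- pv_equiv track=rewrite | github.com/RIshimoto/AtCoder_myPractice | ABC/ABC263/random_checker.py | solve_Jury
-- ===== SOURCE A (Python) =====
-- def solve_Jury(N, L, R, A):
--     ans = sum(A)
--     for x in range(N):
--         A[x] = L
--         B = A.copy()
--         ans = min(ans, sum(B))
--         for y in range(N-1, -1, -1):
--             B[y] = R
--             ans = min(ans, sum(B))
--     return ans
-- ===== SOURCE B (Python) =====
-- def solve_Jury(N, L, R, A):
--     # prefix sums once; each candidate sum is O(1) table arithmetic instead of re-summing the list
--     pref = [0]
--     s = 0
--     for v in A:
--         s += v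
--         pref.append(s)
--     total = s
--     ans = total
--     if N > 0:
--         base = total - pref[N]
--         c1 = [pref[y] + R * (N - y) + base for y in range(N + 1)]
--         lk = [L * k - pref[k] for k in range(N + 1)]
--         for x in range(N):
--             m = x + 1
--             lm = lk[m]
--             for y in range(N, -1, -1):
--                 v = (lk[y] if y < m else lm) + c1[y]
--                 if v < ans:
--                     ans = v
--     return ans
-- ===== Notes on version B (the rewrite author's own statement) =====
-- stated objective: faster
-- what changed: B precomputes prefix sums once and evaluates each candidate (prefix of L, suffix of R) in O(1) arithmetic, instead of A's rebuilding and re-summing a copied list for every candidate; A also mutates its argument A in place, B does not.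
import Mathlib
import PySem

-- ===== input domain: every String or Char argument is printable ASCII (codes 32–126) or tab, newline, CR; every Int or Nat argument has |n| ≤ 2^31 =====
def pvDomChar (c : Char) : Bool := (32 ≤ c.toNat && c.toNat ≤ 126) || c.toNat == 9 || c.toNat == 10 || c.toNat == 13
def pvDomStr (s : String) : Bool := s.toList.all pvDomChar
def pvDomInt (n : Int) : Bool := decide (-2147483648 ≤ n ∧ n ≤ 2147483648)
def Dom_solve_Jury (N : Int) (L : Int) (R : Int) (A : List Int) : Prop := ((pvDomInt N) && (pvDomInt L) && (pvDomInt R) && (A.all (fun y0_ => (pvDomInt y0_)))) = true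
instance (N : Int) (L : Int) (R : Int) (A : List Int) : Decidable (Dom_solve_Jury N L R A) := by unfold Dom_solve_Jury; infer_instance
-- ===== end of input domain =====

-- B replaces A's O(N^3) re-summing of a freshly copied list for every (prefix-of-L, suffix-of-R)
-- candidate by one prefix-sum table and O(1) arithmetic per candidate (O(N^2)); A mutates its
-- argument list in place, B does not — the equivalence proved here is about the return value.


-- ===== PORT A =====
def solve_Jury (N : Int) (L : Int) (R : Int) (A : List Int) : Int :=
  let ans0 := A.sum
  ((PySem.List.pyRange 0 N 1).foldl (fun (st : List Int × Int) x =>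
      let A1 := PySem.List.pySetD st.1 x L
      let B := A1
      let ans1 := min st.2 B.sum
      let inner := (PySem.List.pyRange (N - 1) (-1) (-1)).foldl (fun (st2 : List Int × Int) y =>
          let B1 := PySem.List.pySetD st2.1 y R
          (B1, min st2.2 B1.sum)) (B, ans1)
      (A1, inner.2)) (A, ans0)).2

-- ===== PORT B =====
def solve_Jury_alt (N : Int) (L : Int) (R : Int) (A : List Int) : Int :=
  let ps := A.foldl (fun (st : List Int × Int) v => (st.1 ++ [st.2 + v], st.2 + v)) ([0], 0)
  let pref := ps.1
  let total := ps.2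
  let ans := total
  if 0 < N then
    let base := total - PySem.List.pyGetD pref N 0
    let c1 := (PySem.List.pyRange 0 (N + 1) 1).map
      (fun y => PySem.List.pyGetD pref y 0 + R * (N - y) + base)
    let lk := (PySem.List.pyRange 0 (N + 1) 1).map
      (fun k => L * k - PySem.List.pyGetD pref k 0)
    (PySem.List.pyRange 0 N 1).foldl (fun ans x =>
      let m := x + 1
      let lm := PySem.List.pyGetD lk m 0
      (PySem.List.pyRange N (-1) (-1)).foldl (fun a y =>
        let v := (if y < m then PySem.List.pyGetD lk y 0 else lm) + PySem.List.pyGetD c1 y 0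
        if v < a then v else a) ans) ans
  else ans

-- ===== PRECONDITION & SPEC =====
-- Pre_ excludes exactly the inputs with N > len(A), on which Python A raises IndexError (A[x] = L).
def Pre_solve_Jury (N : Int) (L : Int) (R : Int) (A : List Int) : Prop := N ≤ (A.length : Int)
instance (N : Int) (L : Int) (R : Int) (A : List Int) : Decidable (Pre_solve_Jury N L R A) := by unfold Pre_solve_Jury; infer_instance
def pvWitness_solve_Jury : Int × Int × Int × List Int := (3, 1, 7, [2, -4, 5])

def Spec_solve_Jury (N : Int) (L : Int) (R : Int) (A : List Int) (out : Int) : Prop := out = solve_Jury_alt N L R A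
instance (N : Int) (L : Int) (R : Int) (A : List Int) (out : Int) : Decidable (Spec_solve_Jury N L R A out) := by unfold Spec_solve_Jury; infer_instance

-- ===== CLAIM (what is proved, stated in full; the proofs are below) =====
def Claim_equal_solve_Jury : Prop := ∀ (N : Int) (L : Int) (R : Int) (A : List Int), Dom_solve_Jury N L R A → Pre_solve_Jury N L R A → Spec_solve_Jury N L R A (solve_Jury N L R A)

-- ===== LEMMAS AND PROOFS =====

-- prefix sum of the first i elements
def pvP (A : List Int) (i : Nat) : Int := (A.take i).sum

-- the candidate sum: prefix of x+1 copies of L, suffix of N'-y copies of R (suffix wins on overlap)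
def pvCand (L R : Int) (A : List Int) (N' x y : Nat) : Int :=
  L * ((min (x + 1) y : Nat) : Int) + (pvP A y - pvP A (min (x + 1) y))
    + R * ((N' : Int) - (y : Int)) + (A.sum - pvP A N')

-- the list state during A's inner loop
def pvC (L R : Int) (A : List Int) (N' x y : Nat) : List Int :=
  ((List.replicate (x + 1) L ++ A.drop (x + 1)).take y ++ List.replicate (N' - y) R) ++ A.drop N'

lemma pvP_spec (A : List Int) (k y : Nat) (hk : k ≤ y) :
    ((A.drop k).take (y - k)).sum = pvP A y - pvP A k := by
  have h1 : A.take y = (A.take y).take k ++ (A.take y).drop k := (List.take_append_drop k (A.take y)).symm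
  have h2 : (A.take y).take k = A.take k := by rw [List.take_take]; congr 1; omega
  have h3 : (A.take y).drop k = (A.drop k).take (y - k) := List.drop_take
  have h4 := congrArg List.sum h1
  rw [List.sum_append, h2, h3] at h4
  unfold pvP
  omega

lemma pv_sum_drop (A : List Int) (k : Nat) : (A.drop k).sum = A.sum - pvP A k := by
  have h := congrArg List.sum (List.take_append_drop k A)
  rw [List.sum_append] at h
  unfold pvP
  omega

lemma pvC_sum (L R : Int) (A : List Int) (N' x y : Nat) (hx : x + 1 ≤ N') (hy : y ≤ N')
    (hN : N' ≤ A.length) :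
    (pvC L R A N' x y).sum = pvCand L R A N' x y := by
  unfold pvC pvCand
  rw [List.sum_append, List.sum_append, List.take_append, List.take_replicate, List.sum_append,
    List.length_replicate, List.sum_replicate, List.sum_replicate, pv_sum_drop]
  rcases Nat.le_total y (x + 1) with h | h
  · have h0 : y - (x + 1) = 0 := by omega
    have hm : min y (x + 1) = y := by omega
    have hm2 : min (x + 1) y = y := by omega
    rw [h0, hm, hm2]
    simp only [List.take_zero, List.sum_nil, nsmul_eq_mul]
    have hc : ((N' - y : Nat) : Int) = (N' : Int) - (y : Int) := by omega
    rw [hc]; ring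
  · have hm : min y (x + 1) = x + 1 := by omega
    have hm2 : min (x + 1) y = x + 1 := by omega
    rw [hm, hm2, pvP_spec A (x + 1) y h]
    simp only [nsmul_eq_mul]
    have hc : ((N' - y : Nat) : Int) = (N' : Int) - (y : Int) := by omega
    rw [hc]; ring

lemma pvC_top (L R : Int) (A : List Int) (N' x : Nat) (hx : x + 1 ≤ N') (hN : N' ≤ A.length) :
    pvC L R A N' x N' = List.replicate (x + 1) L ++ A.drop (x + 1) := by
  unfold pvC
  have hdrop : (List.replicate (x + 1) L ++ A.drop (x + 1)).drop N' = A.drop N' := by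
    rw [List.drop_append, List.drop_replicate, List.length_replicate]
    have h1 : x + 1 - N' = 0 := by omega
    rw [h1, List.replicate_zero, List.nil_append, List.drop_drop]
    congr 1
    omega
  rw [Nat.sub_self]
  simp only [List.replicate_zero, List.append_nil]
  rw [← hdrop, List.take_append_drop]

lemma pvC_set (L R : Int) (A : List Int) (N' x y : Nat) (hy : y < N') (hN : N' ≤ A.length) :
    (pvC L R A N' x (y + 1)).set y R = pvC L R A N' x y := by
  unfold pvC
  set T := List.replicate (x + 1) L ++ A.drop (x + 1) with hT
  have hTlen : A.length ≤ T.length := by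
    simp only [hT, List.length_append, List.length_replicate, List.length_drop]
    omega
  have htk : (T.take (y + 1)).length = y + 1 := by
    rw [List.length_take]
    omega
  have hbig : y < ((T.take (y + 1) ++ List.replicate (N' - (y + 1)) R) ++ A.drop N').length := by
    simp only [List.length_append, htk]
    omega
  rw [List.set_eq_take_cons_drop R hbig]
  have htake : ((T.take (y + 1) ++ List.replicate (N' - (y + 1)) R) ++ A.drop N').take y
      = T.take y := by
    have h2 : y - (y + 1) = 0 := by omega
    simp [List.take_append, List.take_take, htk, h2]
  have hdrop : ((T.take (y + 1) ++ List.replicate (N' - (y + 1)) R) ++ A.drop N').drop (y + 1)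
      = List.replicate (N' - (y + 1)) R ++ A.drop N' := by
    simp [htk]
  rw [htake, hdrop]
  have hrep : List.replicate (N' - y) R = R :: List.replicate (N' - (y + 1)) R := by
    have : N' - y = (N' - (y + 1)) + 1 := by omega
    rw [this, List.replicate_succ]
  rw [hrep]
  simp [List.append_assoc]

-- A's inner loop, started on the list pvC … y', computes the running min of pvCand over y'-1 … 0
lemma pv_innerA (L R : Int) (A : List Int) (N' x : Nat) (hx : x + 1 ≤ N') (hN : N' ≤ A.length) :
    ∀ (y' : Nat) (a : Int), y' ≤ N' →
      ((PySem.List.pyRange ((y' : Int) - 1) (-1) (-1)).foldl (fun (st2 : List Int × Int) y =>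
          let B1 := PySem.List.pySetD st2.1 y R
          (B1, min st2.2 B1.sum)) (pvC L R A N' x y', a)).2
      = (PySem.List.pyRange ((y' : Int) - 1) (-1) (-1)).foldl
          (fun a y => min a (pvCand L R A N' x y.toNat)) a := by
  intro y'
  induction y' with
  | zero =>
    intro a _
    rw [PySem.List.pyRange_neg_one_eq_nil (by omega)]
    simp
  | succ n ih =>
    intro a hle
    have hc : ((n + 1 : Nat) : Int) - 1 = (n : Int) := by push_cast; ring
    rw [hc, PySem.List.pyRange_neg_one_cons (by omega)]
    simp only [List.foldl_cons]
    have hset : PySem.List.pySetD (pvC L R A N' x (n + 1)) ((n : Nat) : Int) R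
        = pvC L R A N' x n := by
      rw [PySem.List.pySetD_natCast, pvC_set L R A N' x n (by omega) hN]
    simp only [hset, Int.toNat_natCast]
    rw [pvC_sum L R A N' x n hx (by omega) hN]
    exact ih (min a (pvCand L R A N' x n)) (by omega)

lemma pv_set_rep (L : Int) (A : List Int) (t : Nat) (ht : t < A.length) :
    (List.replicate t L ++ A.drop t).set t L = List.replicate (t + 1) L ++ A.drop (t + 1) := by
  rw [List.drop_eq_getElem_cons ht]
  have hbig : t < (List.replicate t L ++ A[t] :: A.drop (t + 1)).length := by
    simp
    omega
  rw [List.set_eq_take_cons_drop L hbig]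
  have htake : (List.replicate t L ++ A[t] :: A.drop (t + 1)).take t = List.replicate t L := by
    rw [List.take_append]
    simp
  have hdrop : (List.replicate t L ++ A[t] :: A.drop (t + 1)).drop (t + 1)
      = A.drop (t + 1) := by
    rw [List.drop_append]
    simp
  rw [htake, hdrop, List.replicate_succ']
  simp [List.append_assoc]

-- the prefix-sum fold of B
lemma pv_pref_fold (A : List Int) : ∀ (l0 : List Int) (s0 : Int),
    A.foldl (fun (st : List Int × Int) v => (st.1 ++ [st.2 + v], st.2 + v)) (l0, s0)
    = (l0 ++ (List.range A.length).map (fun i => s0 + pvP A (i + 1)), s0 + A.sum) := by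
  induction A with
  | nil => intro l0 s0; simp [pvP]
  | cons a A ih =>
    intro l0 s0
    simp only [List.foldl_cons]
    rw [ih]
    rw [Prod.mk.injEq]
    have hP1 : pvP (a :: A) 1 = a := by simp [pvP]
    have hPs : ∀ i : Nat, pvP (a :: A) (i + 1 + 1) = a + pvP A (i + 1) := by
      intro i; simp [pvP]
    constructor
    · rw [List.length_cons, List.range_succ_eq_map, List.map_cons, List.map_map]
      simp only [hP1]
      rw [List.append_assoc]
      congr 1
      simp only [List.singleton_append]
      congr 1
      apply List.map_congr_left
      intro i _
      simp only [Function.comp_apply, Nat.succ_eq_add_one, hPs i]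
      ring
    · simp only [List.sum_cons]; ring

lemma pv_pref_list (A : List Int) :
    A.foldl (fun (st : List Int × Int) v => (st.1 ++ [st.2 + v], st.2 + v)) ([0], 0)
    = ((List.range (A.length + 1)).map (fun i => pvP A i), A.sum) := by
  rw [pv_pref_fold]
  rw [Prod.mk.injEq]
  constructor
  · rw [List.range_succ_eq_map, List.map_cons, List.map_map]
    simp [pvP, Function.comp, Nat.succ_eq_add_one]
  · simp

lemma pv_getPref (A : List Int) (i : Int) (h0 : 0 ≤ i) (h1 : i ≤ (A.length : Int)) :
    PySem.List.pyGetD ((List.range (A.length + 1)).map (fun i => pvP A i)) i 0 = pvP A i.toNat := by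
  rw [PySem.List.pyGetD_eq_getElem _ 0 h0 (by simp; omega)]
  rw [List.getElem_map, List.getElem_range]

-- A's outer loop, on the mutated list, computes B's running-min fold
lemma pv_outer (L R : Int) (A : List Int) (N' : Nat) (hN : N' ≤ A.length) :
    ∀ (t : Nat), t ≤ N' → ∀ a : Int,
      (PySem.List.pyRange 0 (t : Int) 1).foldl (fun (st : List Int × Int) x =>
        let A1 := PySem.List.pySetD st.1 x L
        let B := A1
        let ans1 := min st.2 B.sum
        let inner := (PySem.List.pyRange ((N' : Int) - 1) (-1) (-1)).foldl
          (fun (st2 : List Int × Int) y =>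
            let B1 := PySem.List.pySetD st2.1 y R
            (B1, min st2.2 B1.sum)) (B, ans1)
        (A1, inner.2)) (A, a)
      = (List.replicate t L ++ A.drop t,
         (PySem.List.pyRange 0 (t : Int) 1).foldl (fun a x =>
            (PySem.List.pyRange ((N' : Int) - 1) (-1) (-1)).foldl
              (fun a y => min a (pvCand L R A N' x.toNat y.toNat))
              (min a (pvCand L R A N' x.toNat N'))) a) := by
  intro t
  induction t with
  | zero =>
    intro _ a
    rw [PySem.List.pyRange_one_eq_nil (by omega)]
    simp
  | succ t ih =>
    intro hle a
    have hc : ((t + 1 : Nat) : Int) = (t : Int) + 1 := by push_cast; ring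
    rw [hc, PySem.List.pyRange_one_succ_right (by omega), List.foldl_append, List.foldl_append,
      ih (by omega) a, List.foldl_cons, List.foldl_nil, List.foldl_cons, List.foldl_nil]
    have hx : t + 1 ≤ N' := hle
    have htlen : t < A.length := by omega
    have hset : PySem.List.pySetD (List.replicate t L ++ A.drop t) ((t : Nat) : Int) L
        = pvC L R A N' t N' := by
      rw [PySem.List.pySetD_natCast, pv_set_rep L A t htlen, pvC_top L R A N' t hx hN]
    simp only [hset, Int.toNat_natCast]
    rw [Prod.mk.injEq]
    constructor
    · rw [pvC_top L R A N' t hx hN]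
    · rw [pvC_sum L R A N' t N' hx le_rfl hN]
      exact pv_innerA L R A N' t hx hN N' _ le_rfl

-- B's inner-loop body equals pvCand, once pref is the prefix-sum table
lemma pv_body (L R : Int) (A : List Int) (N x y : Int) (hlen : N ≤ (A.length : Int))
    (hx : 0 ≤ x) (hy0 : 0 ≤ y) (hy : y ≤ N) :
    (if y < x + 1
      then L * y - PySem.List.pyGetD ((List.range (A.length + 1)).map (fun i => pvP A i)) y 0
      else L * (x + 1)
        - PySem.List.pyGetD ((List.range (A.length + 1)).map (fun i => pvP A i)) (x + 1) 0)
      + (PySem.List.pyGetD ((List.range (A.length + 1)).map (fun i => pvP A i)) y 0 + R * (N - y)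
         + (A.sum - PySem.List.pyGetD ((List.range (A.length + 1)).map (fun i => pvP A i)) N 0))
    = pvCand L R A N.toNat x.toNat y.toNat := by
  rw [pv_getPref A y hy0 (by omega), pv_getPref A N (by omega) hlen]
  unfold pvCand
  have h3 : ((N.toNat : Nat) : Int) = N := by omega
  have h4 : ((y.toNat : Nat) : Int) = y := by omega
  by_cases hcase : y < x + 1
  case pos =>
    rw [if_pos hcase]
    have hm : min (x.toNat + 1) y.toNat = y.toNat := by omega
    rw [hm, h3, h4]
    ring
  case neg =>
    rw [if_neg hcase, pv_getPref A (x + 1) (by omega) (by omega)]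
    have hm : min (x.toNat + 1) y.toNat = x.toNat + 1 := by omega
    have h5 : (x + 1).toNat = x.toNat + 1 := by omega
    have h6 : ((x.toNat + 1 : Nat) : Int) = x + 1 := by omega
    rw [hm, h3, h4, h5, h6]
    ring

lemma pv_if_min (a v : Int) : (if v < a then v else a) = min a v := by
  rw [min_comm, min_def]
  split_ifs <;> omega

-- ===== VERDICT (by name: the statement is the Claim_ definition above) =====
theorem solve_Jury_spec : Claim_equal_solve_Jury := by
  intro N L R A _ hpre
  unfold Spec_solve_Jury
  unfold Pre_solve_Jury at hpre
  by_cases hN0 : N ≤ 0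
  case pos =>
    simp only [solve_Jury, solve_Jury_alt, PySem.List.pyRange_one_eq_nil hN0, List.foldl_nil]
    rw [pv_pref_list, ite_self]
  case neg =>
    have hN0' : 0 < N := by omega
    have hNN : N = ((N.toNat : Nat) : Int) := by omega
    have hlen : N.toNat ≤ A.length := by omega
    -- B side: rewrite the prefix table, then every candidate via pv_body
    have hB : solve_Jury_alt N L R A
        = (PySem.List.pyRange 0 ((N.toNat : Nat) : Int) 1).foldl (fun a x =>
            (PySem.List.pyRange (((N.toNat : Nat) : Int)) (-1) (-1)).foldl
              (fun a y => min a (pvCand L R A N.toNat x.toNat y.toNat)) a) A.sum := by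
      simp only [solve_Jury_alt]
      rw [pv_pref_list]
      simp only [if_pos hN0']
      rw [← hNN]
      apply PySem.List.foldl_congr_mem
      intro acc x hxmem
      rw [PySem.List.mem_pyRange_one] at hxmem
      apply PySem.List.foldl_congr_mem
      intro a y hymem
      rw [PySem.List.mem_pyRange_neg_one] at hymem
      rw [PySem.List.pyGetD_map_pyRange_of_nonneg _ _ _ _ (by omega) (by omega),
        PySem.List.pyGetD_map_pyRange_of_nonneg _ _ _ _ (by omega) (by omega),
        PySem.List.pyGetD_map_pyRange_of_nonneg _ _ _ _ (by omega) (by omega)]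
      rw [pv_if_min, pv_body L R A N x y hpre (by omega) (by omega) (by omega)]
    -- split B's inner range at its first element y = N
    have hsplit : ∀ x : Int,
        (PySem.List.pyRange (((N.toNat : Nat) : Int)) (-1) (-1))
        = ((N.toNat : Nat) : Int) :: PySem.List.pyRange (((N.toNat : Nat) : Int) - 1) (-1) (-1) := by
      intro _
      exact PySem.List.pyRange_neg_one_cons (by omega)
    rw [hB, hsplit 0]
    have hA : solve_Jury N L R A
        = ((PySem.List.pyRange 0 ((N.toNat : Nat) : Int) 1).foldl (fun a x =>
            (PySem.List.pyRange (((N.toNat : Nat) : Int) - 1) (-1) (-1)).foldl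
              (fun a y => min a (pvCand L R A N.toNat x.toNat y.toNat))
              (min a (pvCand L R A N.toNat x.toNat N.toNat))) A.sum) := by
      simp only [solve_Jury]
      rw [hNN]
      rw [pv_outer L R A N.toNat hlen N.toNat le_rfl A.sum]
      simp only [Int.toNat_natCast]
    rw [hA]
    apply PySem.List.foldl_congr_mem
    intro acc x _
    rw [List.foldl_cons, Int.toNat_natCast]
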